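-- pv_equiv track=rewrite | github.com/crossroad777/SoloTab | backend/dadagp_tokenizer.py | quantize_time_shift
-- ===== SOURCE A (Python) =====
-- def quantize_time_shift(ticks: int, resolution: int = 480) -> int:
--     """Quantize time shift to a discrete bin.
--
--     Maps ticks to one of ~32 bins representing common rhythmic values.
--     480 ticks = quarter note (standard MIDI resolution).
--
--     Returns:
--         Quantized bin index (0-31)
--     """
--     # Common rhythmic fractions of a quarter note
--     bins = [
--         0, 30, 60, 80, 120, 160, 180, 240,
--         320, 360, 480, 640, 720, 960, 1200,
--         1440, 1920, 2400, 2880, 3360, 3840,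
--         4320, 4800, 5760, 7680, 9600, 11520,
--         15360, 19200, 23040, 30720, 61440,
--     ]
--     # Find closest bin
--     best_idx = 0
--     best_dist = abs(ticks - bins[0])
--     for i, b in enumerate(bins):
--         dist = abs(ticks - b)
--         if dist < best_dist:
--             best_dist = dist
--             best_idx = i
--     return best_idx
-- ===== SOURCE B (Python) =====
-- def quantize_time_shift(ticks: int, resolution: int = 480) -> int:
--     """Quantize time shift via binary search over the sorted bin list.
--
--     Same bins and same lower-index tie-break as the linear scan, but O(log n).
--     """
--     bins = [
--         0, 30, 60, 80, 120, 160, 180, 240,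
--         320, 360, 480, 640, 720, 960, 1200,
--         1440, 1920, 2400, 2880, 3360, 3840,
--         4320, 4800, 5760, 7680, 9600, 11520,
--         15360, 19200, 23040, 30720, 61440,
--     ]
--     # hand-rolled bisect_left (module A imports nothing, so no bisect import)
--     lo, hi = 0, len(bins)
--     while lo < hi:
--         mid = (lo + hi) // 2
--         if bins[mid] < ticks:
--             lo = mid + 1
--         else:
--             hi = mid
--     if lo == 0:
--         return 0
--     if lo == len(bins):
--         return len(bins) - 1
--     if bins[lo] - ticks < ticks - bins[lo - 1]:
--         return lo
--     return lo - 1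
-- ===== Notes on version B (the rewrite author's own statement) =====
-- stated objective: faster
-- what changed: Replaced the linear scan over all 32 bins (tracking best index/distance) with a hand-rolled bisect_left binary search plus a single neighbour comparison, keeping the lower-index tie-break.
import Mathlib
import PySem

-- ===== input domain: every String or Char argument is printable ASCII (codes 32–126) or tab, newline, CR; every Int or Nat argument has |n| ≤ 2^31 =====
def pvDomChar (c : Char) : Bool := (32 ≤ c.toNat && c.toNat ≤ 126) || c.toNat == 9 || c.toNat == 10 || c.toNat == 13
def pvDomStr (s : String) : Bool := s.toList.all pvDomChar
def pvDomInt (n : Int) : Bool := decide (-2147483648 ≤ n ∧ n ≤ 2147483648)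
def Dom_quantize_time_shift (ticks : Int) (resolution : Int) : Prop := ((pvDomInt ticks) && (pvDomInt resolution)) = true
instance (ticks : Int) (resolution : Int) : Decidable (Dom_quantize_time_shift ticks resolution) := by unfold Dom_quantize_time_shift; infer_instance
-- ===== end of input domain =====

-- B replaces A's linear scan over the 32 bins by a hand-rolled binary search (bisect_left)
-- plus a neighbour comparison with the same lower-index tie-break; objective: faster (constant/log-vs-linear over a fixed list).


-- the bin list both Pythons hardcode
def pvBins : List Int :=
  [0, 30, 60, 80, 120, 160, 180, 240,
   320, 360, 480, 640, 720, 960, 1200,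
   1440, 1920, 2400, 2880, 3360, 3840,
   4320, 4800, 5760, 7680, 9600, 11520,
   15360, 19200, 23040, 30720, 61440]

-- ===== PORT A =====
-- linear scan: best_idx/best_dist updated over enumerate(bins); bins[0] via pyGetD (in range: bins nonempty)
def quantize_time_shift (ticks : Int) (resolution : Int) : Int :=
  let bins := pvBins
  let best := (PySem.List.enumerate bins 0).foldl
    (fun (st : Int × Int) (ib : Int × Int) =>
      let dist := |ticks - ib.2|
      if dist < st.2 then (ib.1, dist) else st)
    (0, |ticks - PySem.List.pyGetD bins 0 0|)
  best.1

-- ===== PORT B =====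
-- hand-rolled bisect_left loop of Source B; lo/hi are nonnegative Python ints, carried as Nat ('//' on them = Nat '/')
def pvBisect (bins : List Int) (t : Int) (lo hi : Nat) : Nat :=
  if lo < hi then
    let mid := (lo + hi) / 2
    if PySem.List.pyGetD bins (mid : Int) 0 < t then pvBisect bins t (mid + 1) hi
    else pvBisect bins t lo mid
  else lo
termination_by hi - lo
decreasing_by all_goals omega

def quantize_time_shift_alt (ticks : Int) (resolution : Int) : Int :=
  let bins := pvBins
  let lo := pvBisect bins ticks 0 bins.length
  if lo = 0 then 0
  else if lo = bins.length then (bins.length : Int) - 1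
  else if PySem.List.pyGetD bins (lo : Int) 0 - ticks < ticks - PySem.List.pyGetD bins ((lo : Int) - 1) 0
    then (lo : Int) else (lo : Int) - 1

-- ===== PRECONDITION & SPEC =====
def Spec_quantize_time_shift (ticks : Int) (resolution : Int) (out : Int) : Prop := out = quantize_time_shift_alt ticks resolution
instance (ticks : Int) (resolution : Int) (out : Int) : Decidable (Spec_quantize_time_shift ticks resolution out) := by unfold Spec_quantize_time_shift; infer_instance

-- ===== CLAIM (what is proved, stated in full; the proofs are below) =====
def Claim_equal_quantize_time_shift : Prop := ∀ (ticks : Int) (resolution : Int), Dom_quantize_time_shift ticks resolution → Spec_quantize_time_shift ticks resolution (quantize_time_shift ticks resolution)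

-- ===== LEMMAS AND PROOFS =====

-- "i is the first index of pvBins minimizing |t - pvBins[i]|"
def NearestAt (t : Int) (i : Nat) : Prop :=
  ∃ hi : i < pvBins.length,
    (∀ j (hj : j < pvBins.length), |t - pvBins[i]| ≤ |t - pvBins[j]|) ∧
    (∀ j (hj : j < pvBins.length), j < i → |t - pvBins[i]| < |t - pvBins[j]|)

theorem nearest_unique (t : Int) (i i' : Nat) (h : NearestAt t i) (h' : NearestAt t i') : i = i' := by
  obtain ⟨hi, hmin, hfirst⟩ := h
  obtain ⟨hi', hmin', hfirst'⟩ := h'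
  rcases lt_trichotomy i i' with hlt | he | hgt
  · exact absurd (hmin i' hi') (not_le.mpr (hfirst' i hi hlt))
  · exact he
  · exact absurd (hmin' i hi) (not_le.mpr (hfirst i' hi' hgt))

theorem bins_sorted : ∀ (i j : Nat) (hi : i < pvBins.length) (hj : j < pvBins.length),
    i < j → pvBins[i] < pvBins[j] := by
  have h : List.Pairwise (· < ·) pvBins := by decide
  intro i j hi hj hij
  exact (List.pairwise_iff_getElem.mp h) i j hi hj hij

-- characterization of A's fold over any tail, any start index, any state
theorem foldA_char (t : Int) (l : List Int) : ∀ (k : Int) (st : Int × Int),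
    (let r := (PySem.List.enumerate l k).foldl
        (fun (st : Int × Int) (ib : Int × Int) =>
          let dist := |t - ib.2|
          if dist < st.2 then (ib.1, dist) else st) st
     (r = st ∧ ∀ j (hj : j < l.length), st.2 ≤ |t - l[j]|) ∨
     (∃ i, ∃ hi : i < l.length, r = ((k + i : Int), |t - l[i]|) ∧ |t - l[i]| < st.2 ∧
        (∀ j (hj : j < l.length), |t - l[i]| ≤ |t - l[j]|) ∧
        (∀ j (hj : j < l.length), j < i → |t - l[i]| < |t - l[j]|))) := by
  induction l with
  | nil => intro k st; left; exact ⟨rfl, fun j hj => absurd hj (by simp)⟩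
  | cons b l ih =>
    intro k st
    rw [PySem.List.enumerate_cons, List.foldl_cons]
    by_cases h : |t - b| < st.2
    · have hstep : (let dist := |t - ((k, b) : Int × Int).2|
          if dist < st.2 then (((k, b) : Int × Int).1, dist) else st) = ((k, |t - b|) : Int × Int) := by
        simp [h]
      rw [hstep]
      rcases ih (k + 1) ((k, |t - b|)) with ⟨hr, hall⟩ | ⟨i, hi, hr, hlt, hmin, hfirst⟩
      · right
        refine ⟨0, by simp, ?_, by simpa using h, ?_, ?_⟩
        · simpa using hr
        · intro j hj
          match j with
          | 0 => simp
          | j + 1 => simpa using hall j (by simpa using hj)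
        · intro j hj hj0; omega
      · right
        have hlt' : |t - l[i]| < |t - b| := by simpa using hlt
        refine ⟨i + 1, by simpa using hi, ?_, ?_, ?_, ?_⟩
        · rw [hr]
          refine Prod.ext ?_ (by simp)
          show k + 1 + (i : Int) = k + ((i : Nat) + 1 : Nat)
          push_cast; ring
        · simp only [List.getElem_cons_succ]
          exact lt_trans hlt' h
        · intro j hj
          match j with
          | 0 =>
            simp only [List.getElem_cons_succ, List.getElem_cons_zero]
            exact le_of_lt hlt'
          | j + 1 =>
            simpa using hmin j (by simpa using hj)
        · intro j hj hji
          match j with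
          | 0 =>
            simp only [List.getElem_cons_succ, List.getElem_cons_zero]
            exact hlt'
          | j + 1 =>
            simpa using hfirst j (by simpa using hj) (by omega)
    · have hstep : (let dist := |t - ((k, b) : Int × Int).2|
          if dist < st.2 then (((k, b) : Int × Int).1, dist) else st) = st := by
        simp [h]
      rw [hstep]
      push Not at h
      rcases ih (k + 1) st with ⟨hr, hall⟩ | ⟨i, hi, hr, hlt, hmin, hfirst⟩
      · left
        refine ⟨hr, ?_⟩
        intro j hj
        match j with
        | 0 => simpa using h
        | j + 1 => simpa using hall j (by simpa using hj)
      · right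
        refine ⟨i + 1, by simpa using hi, ?_, ?_, ?_, ?_⟩
        · rw [hr]
          refine Prod.ext ?_ (by simp)
          show k + 1 + (i : Int) = k + ((i : Nat) + 1 : Nat)
          push_cast; ring
        · simpa using hlt
        · intro j hj
          match j with
          | 0 =>
            simp only [List.getElem_cons_succ, List.getElem_cons_zero]
            exact le_of_lt (lt_of_lt_of_le hlt h)
          | j + 1 => simpa using hmin j (by simpa using hj)
        · intro j hj hji
          match j with
          | 0 =>
            simp only [List.getElem_cons_succ, List.getElem_cons_zero]
            exact lt_of_lt_of_le hlt h
          | j + 1 => simpa using hfirst j (by simpa using hj) (by omega)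

-- A returns the first-argmin index
theorem A_nearest (t res : Int) : ∃ i : Nat, quantize_time_shift t res = (i : Int) ∧ NearestAt t i := by
  unfold quantize_time_shift
  have h0 : PySem.List.pyGetD pvBins 0 0 = pvBins[0] := by decide
  rcases foldA_char t pvBins 0 (0, |t - PySem.List.pyGetD pvBins 0 0|) with ⟨hr, hall⟩ | ⟨i, hi, hr, _, hmin, hfirst⟩
  · refine ⟨0, ?_, ⟨by decide, ?_, ?_⟩⟩
    · simp only [hr]; norm_num
    · intro j hj
      have := hall j hj
      rwa [h0] at this
    · intro j hj hj0; omega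
  · refine ⟨i, ?_, ⟨hi, hmin, hfirst⟩⟩
    simp only [hr]
    push_cast; ring

-- bisect invariant
theorem bisect_inv (t : Int) : ∀ (lo hi : Nat), lo ≤ hi → hi ≤ pvBins.length →
    (∀ j (hj : j < pvBins.length), j < lo → pvBins[j] < t) →
    (∀ j (hj : j < pvBins.length), hi ≤ j → t ≤ pvBins[j]) →
    (let p := pvBisect pvBins t lo hi
     p ≤ pvBins.length ∧ (∀ j (hj : j < pvBins.length), j < p → pvBins[j] < t) ∧
       (∀ j (hj : j < pvBins.length), p ≤ j → t ≤ pvBins[j])) := by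
  intro lo hi
  induction lo, hi using pvBisect.induct pvBins t with
  | case1 lo hi hlh mid hb ih =>
    intro _ hhi hlo' hhi'
    rw [pvBisect, if_pos hlh]
    simp only [show (lo + hi) / 2 = mid from rfl, if_pos hb]
    refine ih (by omega) hhi ?_ hhi'
    intro j hj hjm
    have hmlt : mid < pvBins.length := by omega
    have hmb : PySem.List.pyGetD pvBins (mid : Int) 0 = pvBins[mid] := by
      rw [PySem.List.pyGetD_natCast]; exact List.getD_eq_getElem _ _ hmlt
    rcases Nat.lt_or_ge j mid with hc | hc
    · calc pvBins[j] < pvBins[mid] := bins_sorted j mid hj hmlt hc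
        _ < t := by rwa [hmb] at hb
    · have : j = mid := by omega
      subst this; rwa [hmb] at hb
  | case2 lo hi hlh mid hb ih =>
    intro hle hhi hlo' hhi'
    rw [pvBisect, if_pos hlh]
    simp only [show (lo + hi) / 2 = mid from rfl, if_neg hb]
    refine ih (by omega) (by omega) hlo' ?_
    push Not at hb
    intro j hj hjm
    have hmlt : mid < pvBins.length := by omega
    have hmb : PySem.List.pyGetD pvBins (mid : Int) 0 = pvBins[mid] := by
      rw [PySem.List.pyGetD_natCast]; exact List.getD_eq_getElem _ _ hmlt
    rcases Nat.lt_or_ge j mid with hc | hc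
    · omega
    · rcases Nat.eq_or_lt_of_le hc with hc | hc
      · subst hc; rwa [hmb] at hb
      · calc t ≤ pvBins[mid] := by rwa [hmb] at hb
          _ ≤ pvBins[j] := le_of_lt (bins_sorted mid j hmlt hj hc)
  | case3 lo hi hlh =>
    intro hle hhi hlo' hhi'
    rw [pvBisect, if_neg hlh]
    exact ⟨by omega, hlo', fun j hj hpj => hhi' j hj (by omega)⟩

-- B returns a first-argmin index
theorem B_nearest (t res : Int) : ∃ i : Nat, quantize_time_shift_alt t res = (i : Int) ∧ NearestAt t i := by
  have hq : quantize_time_shift_alt t res =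
      (if pvBisect pvBins t 0 pvBins.length = 0 then 0
       else if pvBisect pvBins t 0 pvBins.length = pvBins.length then (pvBins.length : Int) - 1
       else if PySem.List.pyGetD pvBins ((pvBisect pvBins t 0 pvBins.length : Nat) : Int) 0 - t <
              t - PySem.List.pyGetD pvBins (((pvBisect pvBins t 0 pvBins.length : Nat) : Int) - 1) 0
         then ((pvBisect pvBins t 0 pvBins.length : Nat) : Int)
         else ((pvBisect pvBins t 0 pvBins.length : Nat) : Int) - 1) := rfl
  have hlen : pvBins.length = 32 := rfl
  obtain ⟨hple, hlt, hge⟩ := bisect_inv t 0 pvBins.length (by omega) le_rfl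
    (by intro j hj h; omega) (by intro j hj h; omega)
  set p := pvBisect pvBins t 0 pvBins.length with hp
  by_cases h0 : p = 0
  · -- t ≤ every bin: bin distances are nondecreasing, index 0 is nearest
    refine ⟨0, by rw [hq, if_pos h0]; norm_num, ⟨by decide, ?_, ?_⟩⟩
    · intro j hj
      have h0' : t ≤ pvBins[0] := hge 0 (by decide) (by omega)
      have hj' : t ≤ pvBins[j] := hge j hj (by omega)
      have hle : pvBins[0] ≤ pvBins[j] := by
        rcases Nat.eq_zero_or_pos j with hz | hz
        · subst hz; rfl
        · exact le_of_lt (bins_sorted 0 j (by decide) hj hz)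
      rw [abs_of_nonpos (by omega), abs_of_nonpos (by omega)]; omega
    · intro j hj hj0; omega
  · by_cases hN : p = pvBins.length
    · -- every bin < t: last index is nearest
      refine ⟨31, ?_, ⟨by decide, ?_, ?_⟩⟩
      · rw [hq, if_neg h0, if_pos hN, hlen]; norm_num
      · intro j hj
        have h31 : pvBins[31] < t := hlt 31 (by decide) (by omega)
        have hj' : pvBins[j] < t := hlt j hj (by omega)
        have hle : pvBins[j] ≤ pvBins[31] := by
          rcases Nat.lt_or_ge j 31 with hc | hc
          · exact le_of_lt (bins_sorted j 31 hj (by decide) hc)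
          · have : j = 31 := by omega
            subst this; rfl
        rw [abs_of_nonneg (by omega), abs_of_nonneg (by omega)]; omega
      · intro j hj hj31
        have h31 : pvBins[31] < t := hlt 31 (by decide) (by omega)
        have hj' : pvBins[j] < t := hlt j hj (by omega)
        have hle : pvBins[j] < pvBins[31] := bins_sorted j 31 hj (by decide) hj31
        rw [abs_of_nonneg (by omega), abs_of_nonneg (by omega)]; omega
    · -- pvBins[p-1] < t ≤ pvBins[p]
      have hpl : p < pvBins.length := by omega
      have hp1 : p - 1 < pvBins.length := by omega
      have hleft : pvBins[p-1] < t := hlt (p - 1) hp1 (by omega)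
      have hright : t ≤ pvBins[p] := hge p hpl le_rfl
      have hgp : PySem.List.pyGetD pvBins (p : Int) 0 = pvBins[p] := by
        rw [PySem.List.pyGetD_natCast]; exact List.getD_eq_getElem _ _ hpl
      have hgp1 : PySem.List.pyGetD pvBins ((p : Int) - 1) 0 = pvBins[p-1] := by
        have hc : ((p : Int) - 1) = ((p - 1 : Nat) : Int) := by omega
        rw [hc, PySem.List.pyGetD_natCast]; exact List.getD_eq_getElem _ _ hp1
      rw [hq, if_neg h0, if_neg hN, hgp, hgp1]
      by_cases hcmp : pvBins[p] - t < t - pvBins[p-1]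
      · -- p is strictly nearer than p-1, hence than everything
        refine ⟨p, by rw [if_pos hcmp], ⟨hpl, ?_, ?_⟩⟩
        · intro j hj
          rcases Nat.lt_or_ge j p with hc | hc
          · have hjt : pvBins[j] ≤ pvBins[p-1] := by
              rcases Nat.lt_or_ge j (p-1) with hc2 | hc2
              · exact le_of_lt (bins_sorted j (p-1) hj hp1 hc2)
              · have : j = p - 1 := by omega
                subst this; rfl
            have hjlt : pvBins[j] < t := hlt j hj hc
            rw [abs_of_nonpos (by omega), abs_of_nonneg (by omega)]; omega
          · have hjt : pvBins[p] ≤ pvBins[j] := by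
              rcases Nat.eq_or_lt_of_le hc with hc2 | hc2
              · subst hc2; rfl
              · exact le_of_lt (bins_sorted p j hpl hj hc2)
            have hjge : t ≤ pvBins[j] := hge j hj hc
            rw [abs_of_nonpos (by omega), abs_of_nonpos (by omega)]; omega
        · intro j hj hjp
          have hjt : pvBins[j] ≤ pvBins[p-1] := by
            rcases Nat.lt_or_ge j (p-1) with hc2 | hc2
            · exact le_of_lt (bins_sorted j (p-1) hj hp1 hc2)
            · have : j = p - 1 := by omega
              subst this; rfl
          have hjlt : pvBins[j] < t := hlt j hj hjp
          rw [abs_of_nonpos (by omega), abs_of_nonneg (by omega)]; omega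
      · -- tie or left nearer: p-1 wins (lower index)
        refine ⟨p - 1, ?_, ⟨hp1, ?_, ?_⟩⟩
        · rw [if_neg hcmp]; omega
        · intro j hj
          push Not at hcmp
          rcases Nat.lt_or_ge j p with hc | hc
          · have hjt : pvBins[j] ≤ pvBins[p-1] := by
              rcases Nat.lt_or_ge j (p-1) with hc2 | hc2
              · exact le_of_lt (bins_sorted j (p-1) hj hp1 hc2)
              · have : j = p - 1 := by omega
                subst this; rfl
            have hjlt : pvBins[j] < t := hlt j hj hc
            rw [abs_of_nonneg (by omega), abs_of_nonneg (by omega)]; omega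
          · have hjt : pvBins[p] ≤ pvBins[j] := by
              rcases Nat.eq_or_lt_of_le hc with hc2 | hc2
              · subst hc2; rfl
              · exact le_of_lt (bins_sorted p j hpl hj hc2)
            have hjge : t ≤ pvBins[j] := hge j hj hc
            rw [abs_of_nonneg (by omega), abs_of_nonpos (by omega)]; omega
        · intro j hj hjp
          have hjlt2 : pvBins[j] < pvBins[p-1] := bins_sorted j (p-1) hj hp1 hjp
          have hjlt : pvBins[j] < t := hlt j hj (by omega)
          rw [abs_of_nonneg (by omega), abs_of_nonneg (by omega)]; omega

-- ===== VERDICT (by name: the statement is the Claim_ definition above) =====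
theorem quantize_time_shift_spec : Claim_equal_quantize_time_shift := by
  intro t res _
  unfold Spec_quantize_time_shift
  obtain ⟨i, hAi, hA⟩ := A_nearest t res
  obtain ⟨i', hBi, hB⟩ := B_nearest t res
  rw [hAi, hBi, nearest_unique t i i' hA hB]
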